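-- pv_equiv track=rewrite | github.com/Erica-zya/ProgrammaticDistillation_Finance | data_preparation/quick_check_train.py | compute_heatmap_type_x_from
-- ===== SOURCE A (Python) =====
-- def compute_heatmap_type_x_from(questions, type_order, from_order):
--     # 4x3 counts
--     type_idx = {t: i for i, t in enumerate(type_order)}
--     from_idx = {f: j for j, f in enumerate(from_order)}
--     mat = [[0 for _ in from_order] for _ in type_order]
--
--     dropped = 0
--     total_used = 0
--
--     for q in questions:
--         at = str(q.get("answer_type", "UNKNOWN"))
--         af = str(q.get("answer_from", "UNKNOWN"))
--         if at in type_idx and af in from_idx: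
--             mat[type_idx[at]][from_idx[af]] += 1
--             total_used += 1
--         else:
--             dropped += 1
--
--     return mat, total_used, dropped
-- ===== SOURCE B (Python) =====
-- def compute_heatmap_type_x_from(questions, type_order, from_order):
--     # Project each question once to its label pair, then count every heatmap
--     # cell independently; used/dropped are derived by set-membership counting.
--     pairs = [(str(q.get("answer_type", "UNKNOWN")), str(q.get("answer_from", "UNKNOWN")))
--              for q in questions]
--     mat = [[pairs.count((t, f)) for f in from_order] for t in type_order]
--     known_t, known_f = set(type_order), set(from_order)
--     used = sum(1 for t, f in pairs if t in known_t and f in known_f)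
--     return mat, used, len(questions) - used
-- ===== Notes on version B (the rewrite author's own statement) =====
-- stated objective: alternative
-- what changed: B has no index dicts and no per-question matrix updates: it projects questions to label pairs once, computes each matrix cell independently as pairs.count((t,f)) in a per-cell nested pass, and derives used/dropped by set-membership counting over the pairs.
import Mathlib
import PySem

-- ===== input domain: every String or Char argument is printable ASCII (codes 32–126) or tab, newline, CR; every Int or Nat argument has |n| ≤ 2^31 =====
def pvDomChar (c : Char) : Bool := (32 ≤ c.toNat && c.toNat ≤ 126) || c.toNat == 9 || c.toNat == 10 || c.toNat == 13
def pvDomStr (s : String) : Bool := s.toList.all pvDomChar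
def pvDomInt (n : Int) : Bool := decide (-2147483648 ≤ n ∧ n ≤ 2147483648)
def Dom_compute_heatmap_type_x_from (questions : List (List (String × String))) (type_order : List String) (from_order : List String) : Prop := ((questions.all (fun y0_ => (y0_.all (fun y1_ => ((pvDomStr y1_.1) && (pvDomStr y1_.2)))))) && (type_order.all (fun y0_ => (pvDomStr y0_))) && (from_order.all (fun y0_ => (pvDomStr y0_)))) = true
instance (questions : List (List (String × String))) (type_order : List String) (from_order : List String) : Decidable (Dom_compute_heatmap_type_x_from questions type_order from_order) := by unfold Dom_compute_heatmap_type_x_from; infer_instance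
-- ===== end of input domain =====

-- B drops A's index dicts and per-question matrix updates entirely: it projects the
-- questions to label pairs once, counts every heatmap cell independently, and derives
-- used/dropped by set-membership counting ("alternative" objective, not faster).
-- (Both dict values are strings, so Python's str(...) is the identity and is dropped in the ports.)

-- ===== PORT A =====

-- `{t: i for i, t in enumerate(order)}` (duplicate keys: last value wins, as in Python)
def pvIdxDict (order : List String) : PySem.Dict String Int :=
  (PySem.List.enumerate order).foldl (fun d p => d.insert p.2 p.1) PySem.Dict.empty

-- the body of A's `for q in questions` loop over the state (mat, total_used, dropped);
-- the `if at in type_idx and af in from_idx` test with the two lookups is the double match;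
-- the indices come from enumerate so `mat[i][j] += 1` always hits an in-range cell,
-- hence `modify i.toNat` is exactly Python's in-place update here.
def pvStepA (tIdx fIdx : PySem.Dict String Int)
    (st : List (List Int) × Int × Int) (q : List (String × String)) :
    List (List Int) × Int × Int :=
  let at_ := (PySem.Dict.mk q).getD "answer_type" "UNKNOWN"
  let af := (PySem.Dict.mk q).getD "answer_from" "UNKNOWN"
  match tIdx.get? at_, fIdx.get? af with
  | some i, some j =>
      (st.1.modify i.toNat (fun row => row.modify j.toNat (· + 1)), st.2.1 + 1, st.2.2)
  | _, _ => (st.1, st.2.1, st.2.2 + 1)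

def compute_heatmap_type_x_from (questions : List (List (String × String))) (type_order : List String) (from_order : List String) : List (List Int) × Int × Int :=
  let tIdx := pvIdxDict type_order
  let fIdx := pvIdxDict from_order
  let mat : List (List Int) := type_order.map (fun _ => from_order.map (fun _ => (0 : Int)))
  questions.foldl (pvStepA tIdx fIdx) (mat, 0, 0)

-- ===== PORT B =====

-- `(str(q.get("answer_type", "UNKNOWN")), str(q.get("answer_from", "UNKNOWN")))`
def pvPairKeys (q : List (String × String)) : String × String :=
  ((PySem.Dict.mk q).getD "answer_type" "UNKNOWN",
   (PySem.Dict.mk q).getD "answer_from" "UNKNOWN")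

def compute_heatmap_type_x_from_alt (questions : List (List (String × String))) (type_order : List String) (from_order : List String) : List (List Int) × Int × Int :=
  let pairs := questions.map pvPairKeys
  let mat : List (List Int) :=
    type_order.map (fun t => from_order.map (fun f => (pairs.count (t, f) : Int)))
  let knownT := PySem.Set.ofList type_order
  let knownF := PySem.Set.ofList from_order
  -- `sum(1 for t, f in pairs if t in known_t and f in known_f)`
  let used : Int :=
    (pairs.countP (fun p => knownT.contains p.1 && knownF.contains p.2) : Int)
  (mat, used, (questions.length : Int) - used)

-- ===== PRECONDITION & SPEC =====
-- Pre_ excludes order lists with duplicate labels (A still returns there): on such lists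
-- A's dict-overwrite puts the whole count only in the LAST duplicate row/column — an
-- accident of the index-dict construction — while B repeats the count in each duplicate
-- row/column; with duplicate-free order lists (the intended fixed category lists) they agree.
def Pre_compute_heatmap_type_x_from (questions : List (List (String × String))) (type_order : List String) (from_order : List String) : Prop :=
  type_order.Nodup ∧ from_order.Nodup
instance (questions : List (List (String × String))) (type_order : List String) (from_order : List String) : Decidable (Pre_compute_heatmap_type_x_from questions type_order from_order) := by unfold Pre_compute_heatmap_type_x_from; infer_instance

def pvWitness_compute_heatmap_type_x_from : (List (List (String × String))) × List String × List String :=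
  ([[("answer_type", "mc"), ("answer_from", "doc")], [("answer_type", "num")]],
   ["mc", "num"], ["doc", "web"])

def Spec_compute_heatmap_type_x_from (questions : List (List (String × String))) (type_order : List String) (from_order : List String) (out : List (List Int) × Int × Int) : Prop := out = compute_heatmap_type_x_from_alt questions type_order from_order
instance (questions : List (List (String × String))) (type_order : List String) (from_order : List String) (out : List (List Int) × Int × Int) : Decidable (Spec_compute_heatmap_type_x_from questions type_order from_order out) := by unfold Spec_compute_heatmap_type_x_from; infer_instance

-- ===== CLAIM (what is proved, stated in full; the proofs are below) =====
def Claim_equal_compute_heatmap_type_x_from : Prop := ∀ (questions : List (List (String × String))) (type_order : List String) (from_order : List String), Dom_compute_heatmap_type_x_from questions type_order from_order → Pre_compute_heatmap_type_x_from questions type_order from_order → Spec_compute_heatmap_type_x_from questions type_order from_order (compute_heatmap_type_x_from questions type_order from_order)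

-- ===== LEMMAS AND PROOFS =====

-- total getter for a cell of a list-of-lists matrix
def pvCell (M : List (List Int)) (i j : Nat) : Int := ((M.getD i []).getD j 0)

-- the lookup part shared by A's test and A's indices, as a function of the label pair
def pvMatch (tIdx fIdx : PySem.Dict String Int) (p : String × String) : Option (Int × Int) :=
  match tIdx.get? p.1, fIdx.get? p.2 with
  | some i, some j => some (i, j)
  | _, _ => none

-- the (row, col) index pair a question contributes, if both lookups hit
def pvPairOf (tIdx fIdx : PySem.Dict String Int) (q : List (String × String)) :
    Option (Int × Int) :=
  pvMatch tIdx fIdx (pvPairKeys q)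

-- all values stored by the foldl-insert loop satisfy P, provided the inserted values do
theorem pvFoldlInsertVals {P : Int → Prop} (ps : List (Int × String))
    (hps : ∀ p ∈ ps, P p.1) (d : PySem.Dict String Int)
    (hd : ∀ s v, d.get? s = some v → P v) :
    ∀ s v, (ps.foldl (fun d p => d.insert p.2 p.1) d).get? s = some v → P v := by
  induction ps generalizing d with
  | nil => exact hd
  | cons p ps ih =>
      intro s v hv
      refine ih (fun q hq => hps q (List.mem_cons_of_mem _ hq)) (d.insert p.2 p.1) ?_ s v hv
      intro s' v' h
      rw [PySem.Dict.get?_insert] at h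
      split at h
      · cases h; exact hps p (List.mem_cons_self)
      · exact hd s' v' h

theorem pvIdxDict_bound (order : List String) :
    ∀ s v, (pvIdxDict order).get? s = some v → 0 ≤ v ∧ v.toNat < order.length := by
  refine pvFoldlInsertVals (PySem.List.enumerate order) ?_ PySem.Dict.empty ?_
  · intro p hp
    rcases (PySem.List.mem_enumerate_iff order 0 p).1 hp with ⟨k, hk, rfl⟩
    simp; omega
  · intro s v h
    simp [PySem.Dict.get?_empty] at h

-- on a duplicate-free order list the index dict is lookup-by-idxOf
theorem pvIdxDict_get?_nodup (order : List String) (hnd : order.Nodup) :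
    ∀ s, (pvIdxDict order).get? s
      = if s ∈ order then some (order.idxOf s : Int) else none := by
  have key : ∀ (l : List String), l.Nodup → ∀ (s0 : Int) (d : PySem.Dict String Int) (s : String),
      ((PySem.List.enumerate l s0).foldl (fun d p => d.insert p.2 p.1) d).get? s
        = if s ∈ l then some (s0 + (l.idxOf s : Int)) else d.get? s := by
    intro l
    induction l with
    | nil => intro _ s0 d s; simp [PySem.List.enumerate_nil]
    | cons a rest ih =>
        intro hnd s0 d s
        rw [PySem.List.enumerate_cons, List.foldl_cons]
        rw [ih hnd.of_cons (s0 + 1) (d.insert a s0) s]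
        by_cases hr : s ∈ rest
        · have hne : s ≠ a := fun h => (List.nodup_cons.1 hnd).1 (h ▸ hr)
          rw [if_pos hr, if_pos (List.mem_cons_of_mem a hr)]
          rw [List.idxOf_cons_ne _ (fun h => hne (Eq.symm h))]
          push_cast
          ring_nf
        · rw [if_neg hr, PySem.Dict.get?_insert]
          by_cases hsa : s = a
          · subst hsa
            simp [List.idxOf_cons_self]
          · have : (a == s) = false := by
              simp only [beq_eq_false_iff_ne, ne_eq]
              exact fun h => hsa (Eq.symm h)
            simp [List.mem_cons, hsa, hr]
  intro s
  rw [show pvIdxDict order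
      = (PySem.List.enumerate order 0).foldl (fun d p => d.insert p.2 p.1) PySem.Dict.empty
      from rfl]
  rw [key order hnd 0 PySem.Dict.empty s]
  simp [PySem.Dict.get?_empty]

theorem pvCell_modify (M : List (List Int)) (i0 j0 i j : Nat)
    (hi0 : i0 < M.length) (hj0 : j0 < (M.getD i0 []).length) :
    pvCell (M.modify i0 (fun row => row.modify j0 (· + 1))) i j
      = pvCell M i j + (if i0 = i ∧ j0 = j then 1 else 0) := by
  unfold pvCell
  simp only [List.getD_eq_getElem?_getD, List.getElem?_modify]
  by_cases hii : i0 = i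
  · subst hii
    have h1 : M[i0]? = some M[i0] := List.getElem?_eq_getElem hi0
    have h2 : M.getD i0 [] = M[i0] := by rw [List.getD_eq_getElem?_getD, h1]; rfl
    rw [h2] at hj0
    have h3 : M[i0][j0]? = some M[i0][j0] := List.getElem?_eq_getElem hj0
    by_cases hjj : j0 = j
    · subst hjj; simp [h1, h3]
    · simp [h1, hjj]
  · simp [hii]

-- main invariant of A's loop: shape preserved, each cell grows by the count of its index
-- pair among the matched pairs, total_used by the number of matched pairs, dropped by the rest
theorem pvFoldA {R C : Nat} (tIdx fIdx : PySem.Dict String Int)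
    (hT : ∀ s v, tIdx.get? s = some v → 0 ≤ v ∧ v.toNat < R)
    (hF : ∀ s v, fIdx.get? s = some v → 0 ≤ v ∧ v.toNat < C)
    (qs : List (List (String × String))) (M : List (List Int)) (u d : Int)
    (hM : M.length = R) (hrow : ∀ i, i < R → (M.getD i []).length = C) :
    (qs.foldl (pvStepA tIdx fIdx) (M, u, d)).1.length = R ∧
    (∀ i, i < R → ((qs.foldl (pvStepA tIdx fIdx) (M, u, d)).1.getD i []).length = C) ∧
    (∀ i j : Nat, pvCell (qs.foldl (pvStepA tIdx fIdx) (M, u, d)).1 i j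
        = pvCell M i j
          + (((qs.filterMap (pvPairOf tIdx fIdx)).count ((i : Int), (j : Int))) : Int)) ∧
    (qs.foldl (pvStepA tIdx fIdx) (M, u, d)).2.1
        = u + ((qs.filterMap (pvPairOf tIdx fIdx)).length : Int) ∧
    (qs.foldl (pvStepA tIdx fIdx) (M, u, d)).2.2
        = d + ((qs.length : Int) - ((qs.filterMap (pvPairOf tIdx fIdx)).length : Int)) := by
  induction qs generalizing M u d with
  | nil => refine ⟨hM, hrow, ?_, ?_, ?_⟩ <;> simp
  | cons q qs ih =>
      rcases htl : tIdx.get? ((PySem.Dict.mk q).getD "answer_type" "UNKNOWN") with _ | iv <;>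
      rcases hfl : fIdx.get? ((PySem.Dict.mk q).getD "answer_from" "UNKNOWN") with _ | jv
      -- three "dropped" cases, then the matched case
      case none.none =>
        have hstep : pvStepA tIdx fIdx (M, u, d) q = (M, u, d + 1) := by
          simp only [pvStepA, htl, hfl]
        have hpair : pvPairOf tIdx fIdx q = none := by
          simp only [pvPairOf, pvMatch, pvPairKeys, htl, hfl]
        rw [List.foldl_cons, List.filterMap_cons, hstep, hpair, List.length_cons]
        obtain ⟨h1, h2, h3, h4, h5⟩ := ih M u (d + 1) hM hrow
        refine ⟨h1, h2, h3, by rw [h4], ?_⟩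
        rw [h5]; push_cast; ring
      case none.some =>
        have hstep : pvStepA tIdx fIdx (M, u, d) q = (M, u, d + 1) := by
          simp only [pvStepA, htl, hfl]
        have hpair : pvPairOf tIdx fIdx q = none := by
          simp only [pvPairOf, pvMatch, pvPairKeys, htl, hfl]
        rw [List.foldl_cons, List.filterMap_cons, hstep, hpair, List.length_cons]
        obtain ⟨h1, h2, h3, h4, h5⟩ := ih M u (d + 1) hM hrow
        refine ⟨h1, h2, h3, by rw [h4], ?_⟩
        rw [h5]; push_cast; ring
      case some.none =>
        have hstep : pvStepA tIdx fIdx (M, u, d) q = (M, u, d + 1) := by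
          simp only [pvStepA, htl, hfl]
        have hpair : pvPairOf tIdx fIdx q = none := by
          simp only [pvPairOf, pvMatch, pvPairKeys, htl, hfl]
        rw [List.foldl_cons, List.filterMap_cons, hstep, hpair, List.length_cons]
        obtain ⟨h1, h2, h3, h4, h5⟩ := ih M u (d + 1) hM hrow
        refine ⟨h1, h2, h3, by rw [h4], ?_⟩
        rw [h5]; push_cast; ring
      case some.some =>
        have hstep : pvStepA tIdx fIdx (M, u, d) q
            = (M.modify iv.toNat (fun row => row.modify jv.toNat (· + 1)), u + 1, d) := by
          simp only [pvStepA, htl, hfl]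
        have hpair : pvPairOf tIdx fIdx q = some (iv, jv) := by
          simp only [pvPairOf, pvMatch, pvPairKeys, htl, hfl]
        rw [List.foldl_cons, List.filterMap_cons, hstep, hpair, List.length_cons]
        simp only []
        obtain ⟨hiv0, hivR⟩ := hT _ _ htl
        obtain ⟨hjv0, hjvC⟩ := hF _ _ hfl
        set M1 := M.modify iv.toNat (fun row => row.modify jv.toNat (· + 1)) with hM1
        have hM1len : M1.length = R := by simp [hM1, hM]
        have hrow1 : ∀ i, i < R → (M1.getD i []).length = C := by
          intro i hi
          have hlen : (M[i]?.getD []).length = C := by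
            rw [← List.getD_eq_getElem?_getD]; exact hrow i hi
          simp only [hM1, List.getD_eq_getElem?_getD, List.getElem?_modify]
          cases h : M[i]? with
          | none => exact absurd (List.getElem?_eq_none_iff.1 h) (by omega)
          | some row =>
              rw [h] at hlen
              split <;> simp_all
        obtain ⟨h1, h2, h3, h4, h5⟩ := ih M1 (u + 1) d hM1len hrow1
        refine ⟨h1, h2, ?_, ?_, ?_⟩
        · intro i j
          rw [h3]
          rw [pvCell_modify M iv.toNat jv.toNat i j (by omega)
            (by rw [hrow iv.toNat hivR]; omega)]
          rw [List.count_cons]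
          have hiff : ((iv, jv) == ((i : Int), (j : Int))) = true
              ↔ (iv.toNat = i ∧ jv.toNat = j) := by
            simp only [beq_iff_eq, Prod.mk.injEq]
            omega
          by_cases hc : iv.toNat = i ∧ jv.toNat = j
          · rw [if_pos (hiff.2 hc), if_pos hc]; push_cast; ring
          · rw [if_neg (fun h => hc (hiff.1 h)), if_neg hc]; push_cast; ring
        · rw [h4]; push_cast [List.length_cons]; ring
        · rw [h5]; push_cast [List.length_cons]; ring

-- ===== VERDICT (by name: the statement is the Claim_ definition above) =====
theorem compute_heatmap_type_x_from_spec : Claim_equal_compute_heatmap_type_x_from := by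
  intro questions type_order from_order _ hpre
  obtain ⟨hndT, hndF⟩ := hpre
  unfold Spec_compute_heatmap_type_x_from
  unfold compute_heatmap_type_x_from compute_heatmap_type_x_from_alt
  simp only []
  set tIdx := pvIdxDict type_order with htIdx
  set fIdx := pvIdxDict from_order with hfIdx
  set R := type_order.length with hR
  set C := from_order.length with hC
  set pairs := questions.map pvPairKeys with hpairsdef
  -- A's matched index pairs, re-expressed over B's label pairs
  have hfm : questions.filterMap (pvPairOf tIdx fIdx)
      = pairs.filterMap (pvMatch tIdx fIdx) := by
    rw [hpairsdef, List.filterMap_map]; rfl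
  set M0 : List (List Int) := type_order.map (fun _ => from_order.map (fun _ => (0 : Int))) with hM0
  have hM0len : M0.length = R := by simp [hM0, hR]
  have hM0row : ∀ i, i < R → (M0.getD i []).length = C := by
    intro i hi
    simp only [hM0, List.getD_eq_getElem?_getD]
    rw [List.getElem?_map]
    cases h : type_order[i]? with
    | none => exact absurd (List.getElem?_eq_none_iff.1 h) (by omega)
    | some t => simp [hC]
  have hM0cell : ∀ i j : Nat, i < R → j < C → pvCell M0 i j = 0 := by
    intro i j hi hj
    simp only [pvCell, hM0, List.getD_eq_getElem?_getD, List.getElem?_map]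
    cases h : type_order[i]? with
    | none => exact absurd (List.getElem?_eq_none_iff.1 h) (by omega)
    | some t =>
        simp only [Option.map_some, Option.getD_some]
        cases h2 : from_order[j]? with
        | none => exact absurd (List.getElem?_eq_none_iff.1 h2) (by omega)
        | some f => simp
  obtain ⟨h1, h2, h3, h4, h5⟩ :=
    pvFoldA tIdx fIdx (pvIdxDict_bound type_order) (pvIdxDict_bound from_order)
      questions M0 0 0 hM0len hM0row
  rcases hr : questions.foldl (pvStepA tIdx fIdx) (M0, 0, 0) with ⟨Mf, uf, df⟩
  rw [hr] at h1 h2 h3 h4 h5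
  rw [hfm] at h3 h4 h5
  -- a match succeeds iff both labels are known
  have hmatchSome : ∀ p : String × String,
      (pvMatch tIdx fIdx p).isSome
        = (PySem.Set.contains (PySem.Set.ofList type_order) p.1
            && PySem.Set.contains (PySem.Set.ofList from_order) p.2) := by
    intro p
    have ht := pvIdxDict_get?_nodup type_order hndT p.1
    have hf := pvIdxDict_get?_nodup from_order hndF p.2
    rw [← htIdx] at ht; rw [← hfIdx] at hf
    by_cases h1' : p.1 ∈ type_order <;> by_cases h2' : p.2 ∈ from_order <;>
      simp [pvMatch, ht, hf, h1', h2', PySem.Set.mem_ofList]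
  -- the number of matched pairs is B's `used`
  have hused : ((pairs.filterMap (pvMatch tIdx fIdx)).length : Int)
      = (pairs.countP (fun p =>
          PySem.Set.contains (PySem.Set.ofList type_order) p.1
            && PySem.Set.contains (PySem.Set.ofList from_order) p.2) : Int) := by
    rw [List.length_filterMap_eq_countP]
    congr 2
    funext p
    exact hmatchSome p
  -- a match yields (i, j) iff the label pair is exactly (type_order[i], from_order[j])
  have hmatchEq : ∀ (i j : Nat) (hi : i < R) (hj : j < C) (p : String × String),
      (pvMatch tIdx fIdx p = some ((i : Int), (j : Int)))
        ↔ p = (type_order[i], from_order[j]) := by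
    intro i j hi hj p
    have ht := pvIdxDict_get?_nodup type_order hndT p.1
    have hf := pvIdxDict_get?_nodup from_order hndF p.2
    rw [← htIdx] at ht; rw [← hfIdx] at hf
    constructor
    · intro h
      by_cases h1' : p.1 ∈ type_order <;> by_cases h2' : p.2 ∈ from_order <;>
        simp [pvMatch, ht, hf, h1', h2'] at h
      obtain ⟨hii, hjj⟩ := h
      have hii' : type_order.idxOf p.1 = i := by exact_mod_cast hii
      have hjj' : from_order.idxOf p.2 = j := by exact_mod_cast hjj
      subst hii'; subst hjj'
      exact Prod.ext (List.getElem_idxOf hi).symm (List.getElem_idxOf hj).symm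
    · intro h
      subst h
      have m1 : type_order[i] ∈ type_order := List.getElem_mem hi
      have m2 : from_order[j] ∈ from_order := List.getElem_mem hj
      have e1 : type_order.idxOf type_order[i] = i := hndT.idxOf_getElem i hi
      have e2 : from_order.idxOf from_order[j] = j := hndF.idxOf_getElem j hj
      simp [pvMatch, ht, hf, m1, m2, e1, e2]
  -- the count of index pair (i, j) among the matches is B's cell count
  have hcell : ∀ (i j : Nat) (hi : i < R) (hj : j < C),
      ((pairs.filterMap (pvMatch tIdx fIdx)).count ((i : Int), (j : Int)) : Int)
        = (pairs.count (type_order[i], from_order[j]) : Int) := by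
    intro i j hi hj
    have hnat : (pairs.filterMap (pvMatch tIdx fIdx)).count ((i : Int), (j : Int))
        = pairs.count (type_order[i], from_order[j]) := by
      rw [List.count_filterMap, List.count_eq_countP]
      apply List.countP_congr
      intro p _
      simp only [beq_iff_eq]
      rw [hmatchEq i j hi hj p]
    exact_mod_cast congrArg (Nat.cast : Nat → Int) hnat
  refine Prod.ext ?_ (Prod.ext ?_ ?_)
  · -- matrices agree
    simp only []
    apply List.ext_getElem
    · simpa [hR] using h1
    · intro i hi hi'
      have hiR : i < R := by simpa [h1] using hi
      rw [List.getElem_map]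
      have hrowlen : Mf[i].length = C := by
        have h2i := h2 i hiR
        rw [List.getD_eq_getElem?_getD, List.getElem?_eq_getElem hi, Option.getD_some] at h2i
        exact h2i
      apply List.ext_getElem
      · simpa [hC] using hrowlen
      · intro j hj hj'
        have hjC : j < C := hrowlen ▸ hj
        rw [List.getElem_map]
        have hcA := h3 i j
        rw [hM0cell i j hiR hjC, zero_add] at hcA
        have hget : pvCell Mf i j = Mf[i][j] := by
          simp [pvCell, List.getD_eq_getElem?_getD, List.getElem?_eq_getElem hi,
            List.getElem?_eq_getElem hj]
        rw [hget] at hcA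
        rw [hcA, hcell i j hiR hjC]
  · rw [h4, zero_add, hused]
  · rw [h5, zero_add, hused]
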